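-- pv_equiv track=rewrite | github.com/muneebaifrah/Unstop-100-Days-Coding-Sprint | Day-03/4.Sum_of_Different_Bits.py | compareBits
-- ===== SOURCE A (Python) =====
-- def compareBits(a, b):
--     m = len(a)
--     n = len(b)
--     total_diff = 0
--
--     for i in range(n - m + 1):
--         diff = 0
--         for j in range(m):
--             if a[j] != b[i + j]:
--                 diff += 1
--         total_diff += diff
--
--     return total_diff
-- ===== SOURCE B (Python) =====
-- def compareBits(a, b):
--     m, n = len(a), len(b)
--     w = n - m + 1
--     if w <= 0:
--         return 0
--     total = 0
--     for j, c in enumerate(a):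
--         total += w - b[j:j+w].count(c)
--     return total
-- ===== Notes on version B (the rewrite author's own statement) =====
-- stated objective: alternative
-- what changed: B swaps the order of summation: instead of scanning each window start i and counting mismatches position by position in a nested loop, it makes one pass over the positions j of a and adds w - b[j:j+w].count(a[j]), where w = n - m + 1 is the number of windows.
import Mathlib
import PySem

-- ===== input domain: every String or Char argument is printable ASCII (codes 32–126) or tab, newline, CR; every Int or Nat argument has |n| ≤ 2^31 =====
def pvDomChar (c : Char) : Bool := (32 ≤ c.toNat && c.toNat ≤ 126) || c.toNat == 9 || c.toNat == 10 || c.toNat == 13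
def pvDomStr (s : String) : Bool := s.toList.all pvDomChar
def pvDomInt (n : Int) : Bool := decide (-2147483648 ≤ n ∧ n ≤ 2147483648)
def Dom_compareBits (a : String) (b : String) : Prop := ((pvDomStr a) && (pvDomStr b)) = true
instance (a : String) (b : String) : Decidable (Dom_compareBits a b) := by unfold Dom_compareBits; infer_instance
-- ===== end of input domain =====

-- B re-sums A's window-by-window mismatch count per position of `a`: per j it adds w minus the count of a[j] in the slice b[j:j+w] (an order-of-summation change; same cost).

-- ===== PORT A =====
-- literal port of A: for each window start i, count position-by-position mismatches, accumulate
def compareBits (a : String) (b : String) : Int :=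
  let A := a.toList
  let B := b.toList
  let m : Int := PySem.Str.len a
  let n : Int := PySem.Str.len b
  (PySem.List.pyRange 0 (n - m + 1) 1).foldl (fun total_diff i =>
    let diff := (PySem.List.pyRange 0 m 1).foldl (fun d j =>
      if PySem.List.pyGetD A j ' ' ≠ PySem.List.pyGetD B (i + j) ' ' then d + 1 else d) 0
    total_diff + diff) 0

-- ===== PORT B =====
-- literal port of Source B: one pass over enumerate(a); per (j, c) add w - count of c in b[j:j+w]
def compareBits_alt (a : String) (b : String) : Int :=
  let A := a.toList
  let B := b.toList
  let m : Int := PySem.Str.len a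
  let n : Int := PySem.Str.len b
  let w := n - m + 1
  if w ≤ 0 then 0
  else
    (PySem.List.enumerate A 0).foldl (fun total jc =>
      let mts : Int := PySem.Chars.count (PySem.List.slice B (some jc.1) (some (jc.1 + w))) [jc.2]
      total + (w - mts)) 0

-- ===== PRECONDITION & SPEC =====
def Spec_compareBits (a : String) (b : String) (out : Int) : Prop := out = compareBits_alt a b
instance (a : String) (b : String) (out : Int) : Decidable (Spec_compareBits a b out) := by unfold Spec_compareBits; infer_instance

-- ===== CLAIM (what is proved, stated in full; the proofs are below) =====
def Claim_equal_compareBits : Prop := ∀ (a : String) (b : String), Dom_compareBits a b → Spec_compareBits a b (compareBits a b)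

-- ===== LEMMAS AND PROOFS =====
lemma sum_map_range_eq (n : ℕ) (f : ℕ → ℤ) : ((List.range n).map f).sum = ∑ i ∈ Finset.range n, f i := by
  induction n with
  | zero => simp
  | succ k ih => rw [List.range_succ, Finset.sum_range_succ, List.map_append]; simp [ih]

lemma foldl_if_count {α : Type} (P : α → Prop) [DecidablePred P] (l : List α) (a : Int) :
    l.foldl (fun d x => if P x then d + 1 else d) a = a + (l.map (fun x => if P x then (1:Int) else 0)).sum := by
  induction l generalizing a with
  | nil => simp
  | cons x t ih => by_cases h : P x <;> simp [h, ih, add_assoc]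

lemma go_single (c : Char) : ∀ (fuel : ℕ) (l : List Char) (acc : ℕ), l.length ≤ fuel →
    PySem.Chars.count.go [c] fuel l acc = acc + l.count c := by
  intro fuel
  induction fuel with
  | zero =>
    intro l acc h
    have hl : l = [] := List.length_eq_zero_iff.mp (by omega)
    subst hl; rfl
  | succ k ih =>
    intro l acc h
    cases l with
    | nil => rfl
    | cons x t =>
      rw [PySem.Chars.count.go]
      by_cases hx : x = c
      · simp [List.isPrefixOf, hx, ih t (acc+1) (by simpa using h)]
        omega
      · simp [List.isPrefixOf, hx, ih t acc (by simpa using h), Ne.symm hx]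

lemma chars_count_single (cs : List Char) (c : Char) : PySem.Chars.count cs [c] = cs.count c := by
  simp [PySem.Chars.count, go_single c cs.length cs 0 le_rfl]

lemma count_as_sum (l : List Char) (c : Char) :
    ((l.count c : ℕ) : ℤ) = (l.map (fun ch => if ch = c then (1:ℤ) else 0)).sum := by
  induction l with
  | nil => simp
  | cons x t ih =>
    by_cases hx : x = c
    · simp [hx, ← ih]; ring
    · simp [hx, ← ih]

lemma take_drop_sum (B : List Char) (c : Char) (j W : ℕ) (hjW : j + W ≤ B.length) :
    (((List.take W (List.drop j B)).count c : ℕ) : ℤ)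
      = ∑ i ∈ Finset.range W, (if B.getD (j+i) ' ' = c then (1:ℤ) else 0) := by
  rw [count_as_sum]
  have hlist : List.take W (List.drop j B) = (List.range W).map (fun i => B.getD (j+i) ' ') := by
    apply List.ext_getElem
    · simp; omega
    · intro k h1 h2
      simp only [List.getElem_take, List.getElem_drop, List.getElem_map, List.getElem_range]
      have hb : j + k < B.length := by simp at h1; omega
      rw [List.getD_eq_getElem _ _ hb]
  rw [hlist, List.map_map, sum_map_range_eq]
  rfl

lemma w_sub (W : ℕ) (c : Char) (g : ℕ → Char) :
    (W:ℤ) - ∑ i ∈ Finset.range W, (if g i = c then (1:ℤ) else 0)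
      = ∑ i ∈ Finset.range W, (if c ≠ g i then (1:ℤ) else 0) := by
  have : ∀ i, (if c ≠ g i then (1:ℤ) else 0) = 1 - (if g i = c then (1:ℤ) else 0) := by
    intro i
    by_cases hx : g i = c
    · simp [hx]
    · simp [hx, Ne.symm hx]
  simp only [this]
  rw [Finset.sum_sub_distrib]
  simp

theorem compareBits_eq_alt (a b : String) : compareBits a b = compareBits_alt a b := by
  simp only [compareBits, compareBits_alt, PySem.Str.len_eq]
  set A := a.toList with hA
  set B := b.toList with hB
  clear hA hB
  by_cases h : (B.length : Int) - A.length + 1 ≤ 0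
  · rw [if_pos h,
      show PySem.List.pyRange 0 ((B.length : Int) - A.length + 1) 1 = [] from
        PySem.List.pyRange_one_eq_nil (by omega)]
    simp
  · rw [if_neg h]
    have hMN : A.length ≤ B.length := by omega
    set M := A.length with hM
    set N := B.length with hN
    have hw : (↑N - ↑M + 1 : Int) = ((N - M + 1 : Nat) : Int) := by omega
    set W := N - M + 1 with hW
    rw [hw]
    -- LHS to Finset double sum
    rw [PySem.List.pyRange_zero_nat W, PySem.List.pyRange_zero_nat M, List.foldl_map,
        PySem.List.foldl_add]
    simp only [List.foldl_map, PySem.List.pyGetD_natCast]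
    simp only [← Nat.cast_add, PySem.List.pyGetD_natCast, foldl_if_count, zero_add,
      sum_map_range_eq]
    -- RHS
    rw [PySem.List.enumerate_eq_map_pyRange A ' ', PySem.List.len_eq, PySem.List.pyRange_zero_nat M,
        List.foldl_map, PySem.List.foldl_add, zero_add]
    rw [List.map_map, sum_map_range_eq, Finset.sum_comm]
    apply Finset.sum_congr rfl
    intro j hj
    simp only [Finset.mem_range] at hj
    simp only [Function.comp_apply, PySem.List.pyGetD_natCast, PySem.List.slice_natCast_add]
    rw [chars_count_single, take_drop_sum B _ j W (by omega), w_sub]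
    apply Finset.sum_congr rfl
    intro i _
    rw [Nat.add_comm j i]

-- ===== VERDICT (by name: the statement is the Claim_ definition above) =====
theorem compareBits_spec : Claim_equal_compareBits := by
  intro a b _
  unfold Spec_compareBits
  exact compareBits_eq_alt a b
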